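-- pv_equiv track=rewrite | github.com/osirislab/CSAW-CTF-2017-Quals | rev/bananascript/solve.py | properFlag
-- ===== SOURCE A (Python) =====
-- def properFlag(flag):
--     if ' ' in flag:
--         return 0
--     elif 'o' in flag:
--         return 0
--     elif 'a' in flag:
--         return 0
--     elif 'e' in flag:
--         return 0
--     elif 't' in flag:
--         return 0
--     elif 'l' in flag:
--         return 0
--     else:
--         for char in flag:
--             if char.isupper():
--                 return 0
--         return 1
-- ===== SOURCE B (Python) =====
-- def properFlag(flag):
--     bad = sum(c in " oaetl" or c.isupper() for c in flag)
--     return 1 if bad == 0 else 0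
-- ===== Notes on version B (the rewrite author's own statement) =====
-- stated objective: alternative
-- what changed: Replaces A's six sequential substring scans plus an explicit early-return uppercase loop with one fused counting pass: it sums a per-character bad-indicator (forbidden-or-uppercase) over the whole string and returns 1 iff the count is zero, with no early exit and no staged passes.
import Mathlib
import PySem

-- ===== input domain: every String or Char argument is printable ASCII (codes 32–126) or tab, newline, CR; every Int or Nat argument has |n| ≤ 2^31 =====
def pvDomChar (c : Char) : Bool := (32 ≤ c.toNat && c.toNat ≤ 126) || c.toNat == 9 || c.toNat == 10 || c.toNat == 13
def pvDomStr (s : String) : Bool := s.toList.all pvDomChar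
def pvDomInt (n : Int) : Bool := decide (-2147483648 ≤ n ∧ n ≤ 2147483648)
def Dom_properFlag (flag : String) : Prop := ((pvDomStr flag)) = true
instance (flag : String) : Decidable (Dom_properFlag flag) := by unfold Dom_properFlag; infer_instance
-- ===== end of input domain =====

-- B replaces A's staged early-return scans by one fused counting pass (sum of
-- bad-character indicators, then 1 iff the count is zero); objective: alternative, same cost.

-- ===== PORT A =====
-- the 'for char in flag: if char.isupper(): return 0' loop, transcribed
def properFlagLoopA : List Char → Int
  | [] => 1
  | c :: rest => if PySem.Chars.isupper c then 0 else properFlagLoopA rest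

def properFlag (flag : String) : Int :=
  if PySem.Str.isIn " " flag then 0
  else if PySem.Str.isIn "o" flag then 0
  else if PySem.Str.isIn "a" flag then 0
  else if PySem.Str.isIn "e" flag then 0
  else if PySem.Str.isIn "t" flag then 0
  else if PySem.Str.isIn "l" flag then 0
  else properFlagLoopA flag.toList

-- ===== PORT B =====
-- per-character indicator of 'c in " oaetl" or c.isupper()'
def pvBadChar (c : Char) : Bool :=
  " oaetl".toList.contains c || PySem.Chars.isupper c

def properFlag_alt (flag : String) : Int :=
  let bad : Int :=
    flag.toList.foldl (fun acc c => acc + (if pvBadChar c then 1 else 0)) 0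
  if bad = 0 then 1 else 0

-- ===== PRECONDITION & SPEC =====
def Spec_properFlag (flag : String) (out : Int) : Prop := out = properFlag_alt flag
instance (flag : String) (out : Int) : Decidable (Spec_properFlag flag out) := by unfold Spec_properFlag; infer_instance

-- ===== CLAIM (what is proved, stated in full; the proofs are below) =====
def Claim_equal_properFlag : Prop := ∀ (flag : String), Dom_properFlag flag → Spec_properFlag flag (properFlag flag)

-- ===== LEMMAS AND PROOFS =====

-- single-character 'c in s' is character membership
lemma chars_isIn_singleton (c : Char) (l : List Char) :
    PySem.Chars.isIn [c] l = true ↔ c ∈ l := by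
  rw [PySem.Chars.isIn_iff_infix]
  constructor
  · intro h
    exact h.mem (List.mem_singleton_self c)
  · intro h
    obtain ⟨l1, r, hlr⟩ := List.mem_iff_append.mp h
    refine ⟨l1, r, ?_⟩
    simp [hlr]

-- A's trailing loop returns 1 iff no uppercase char
lemma loopA_eq_any (l : List Char) :
    properFlagLoopA l = if l.any (fun c => PySem.Chars.isupper c) then 0 else 1 := by
  induction l with
  | nil => simp [properFlagLoopA]
  | cons c rest ih =>
    by_cases h : PySem.Chars.isupper c = true <;> simp [properFlagLoopA, h, ih]

-- B's fold is a countP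
lemma fold_eq_countP (l : List Char) (acc : Int) :
    l.foldl (fun acc c => acc + (if pvBadChar c then 1 else 0)) acc
      = acc + (l.countP pvBadChar : Int) := by
  induction l generalizing acc with
  | nil => simp
  | cons c rest ih =>
    by_cases h : pvBadChar c = true
    · simp [List.foldl, h, ih]; ring
    · simp [List.foldl, h, ih]

-- B returns 1 iff no bad char
lemma alt_eq_if_any (flag : String) :
    properFlag_alt flag = if flag.toList.any pvBadChar then 0 else 1 := by
  unfold properFlag_alt
  rw [fold_eq_countP]
  by_cases h : flag.toList.any pvBadChar = true
  · obtain ⟨c, hc, hp⟩ := List.any_eq_true.mp h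
    have hpos : flag.toList.countP pvBadChar ≠ 0 := by
      intro h0
      exact absurd hp (by simpa using (List.countP_eq_zero.mp h0) c hc)
    simp [h, hpos]
  · have hz : flag.toList.countP pvBadChar = 0 := by
      rw [List.countP_eq_zero]
      intro c hc hp
      exact h (List.any_eq_true.mpr ⟨c, hc, hp⟩)
    simp [h, hz]

lemma badChar_iff (c : Char) :
    pvBadChar c = true ↔
      c = ' ' ∨ c = 'o' ∨ c = 'a' ∨ c = 'e' ∨ c = 't' ∨ c = 'l' ∨ PySem.Chars.isupper c = true := by
  unfold pvBadChar
  constructor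
  · intro h
    rcases Bool.or_eq_true_iff.mp h with h | h
    · have hm : c ∈ " oaetl".toList := by simpa using h
      simp only [show (" oaetl" : String).toList = [' ', 'o', 'a', 'e', 't', 'l'] from rfl,
        List.mem_cons, List.not_mem_nil, or_false] at hm
      tauto
    · tauto
  · intro h
    rcases h with h | h | h | h | h | h | h
    · subst h; decide
    · subst h; decide
    · subst h; decide
    · subst h; decide
    · subst h; decide
    · subst h; decide
    · simp [h]

-- A also returns 1 iff no bad char
lemma a_eq_if_any (flag : String) :
    properFlag flag = if flag.toList.any pvBadChar then 0 else 1 := by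
  unfold properFlag
  by_cases hb : flag.toList.any pvBadChar = true
  · simp only [hb, if_true]
    obtain ⟨c, hc, hp⟩ := List.any_eq_true.mp hb
    rcases (badChar_iff c).mp hp with h | h | h | h | h | h | h
    · subst h; simp [(chars_isIn_singleton ' ' flag.toList).mpr hc]
    · subst h; simp [(chars_isIn_singleton 'o' flag.toList).mpr hc]
    · subst h; simp [(chars_isIn_singleton 'a' flag.toList).mpr hc]
    · subst h; simp [(chars_isIn_singleton 'e' flag.toList).mpr hc]
    · subst h; simp [(chars_isIn_singleton 't' flag.toList).mpr hc]
    · subst h; simp [(chars_isIn_singleton 'l' flag.toList).mpr hc]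
    · have hup : flag.toList.any (fun c => PySem.Chars.isupper c) = true :=
        List.any_eq_true.mpr ⟨c, hc, h⟩
      simp [loopA_eq_any, hup]
  · have hno : ∀ c ∈ flag.toList, pvBadChar c ≠ true := by
      simpa [List.any_eq_true, not_exists] using hb
    have mk : ∀ c : Char, pvBadChar c = true → PySem.Chars.isIn [c] flag.toList = false :=
      fun c hp => Bool.eq_false_iff.mpr
        (fun hh => hno c ((chars_isIn_singleton c flag.toList).mp hh) hp)
    have hup : flag.toList.any (fun c => PySem.Chars.isupper c) = false := by
      rw [List.any_eq_false]
      intro c hc h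
      exact hno c hc ((badChar_iff c).mpr (by tauto))
    simp [mk ' ' (by decide), mk 'o' (by decide), mk 'a' (by decide), mk 'e' (by decide),
      mk 't' (by decide), mk 'l' (by decide), loopA_eq_any, hup, hb]

-- ===== VERDICT (by name: the statement is the Claim_ definition above) =====
theorem properFlag_spec : Claim_equal_properFlag := by
  intro flag _
  unfold Spec_properFlag
  rw [a_eq_if_any, alt_eq_if_any]
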